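-- pv_equiv track=rewrite | github.com/fLaViUsGr/SAT_Implementations | Resolution_SAT_Implementation.py | resolution_solver
-- ===== SOURCE A (Python) =====
-- def to_frozenset_clauses(clauses_list_of_lists):
--     """Converts a list of lists of literals to a set of frozensets of literals."""
--     if not clauses_list_of_lists: # Handles empty list of clauses (satisfiable)
--         return set()
--     return {frozenset(clause) for clause in clauses_list_of_lists}
--
-- def resolve_two_clauses(c1, c2):
--     """
--     Attempts to resolve two clauses c1 and c2.
--     Returns a set of all possible unique resolvents.
--     A resolvent is formed if one clause contains a literal L
--     and the other contains -L. The resolvent is (c1 - {L}) U (c2 - {-L}).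
--     Tautologies (clauses containing both X and -X) are excluded from resolvents.
--     """
--     resolvents = set()
--     for lit1 in c1:
--         if -lit1 in c2:
--             # Potential resolvent
--             temp_resolvent = (c1 - {lit1}) | (c2 - {-lit1})
--
--             # Check for tautology in the resolvent
--             is_tautology = False
--             for lit_r in temp_resolvent:
--                 if -lit_r in temp_resolvent:
--                     is_tautology = True
--                     break
--             if not is_tautology:
--                 resolvents.add(temp_resolvent)
--     return resolvents
--
-- def resolution_solver(clauses_input):
--     """
--     Solves SAT using the Resolution algorithm.
--     Input: A list of lists of integers representing CNF clauses.
--     Output: True if satisfiable, False if unsatisfiable.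
--     """
--     if not clauses_input:
--         return True # Empty set of clauses is satisfiable
--
--     clauses = to_frozenset_clauses(clauses_input)
--
--     if frozenset() in clauses: # Contains an empty clause initially
--         return False
--
--     # Using a list for new_clauses_this_round and checking against the main set 'clauses'
--     # is generally more robust than relying on processed_pairs for termination in basic resolution.
--     # The loop terminates when no new clauses can be added to the main 'clauses' set.
--     while True:
--         newly_derived_this_iteration = set()
--         clauses_list = list(clauses) # For pairing
--
--         for i in range(len(clauses_list)):
--             for j in range(i + 1, len(clauses_list)):
--                 c1 = clauses_list[i]
--                 c2 = clauses_list[j]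
--
--                 resolvents_from_pair = resolve_two_clauses(c1, c2)
--
--                 for r in resolvents_from_pair:
--                     if not r: # Empty clause derived
--                         return False # Unsatisfiable
--                     # Add only if it's truly new and not already in the main clauses set
--                     if r not in clauses:
--                         newly_derived_this_iteration.add(r)
--
--         if not newly_derived_this_iteration:
--             # No new clauses were generated that were not already present
--             return True # Satisfiable (empty clause not found)
--
--         # Add all genuinely new clauses to the main set
--         clauses.update(newly_derived_this_iteration)
-- ===== SOURCE B (Python) =====
-- def resolution_solver(clauses_input):
--     """
--     Solves SAT by propositional resolution, incrementally: each round resolves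
--     only the newly-derived clauses (the frontier) against the whole clause set,
--     instead of re-resolving every pair of clauses every round.
--     Input: list of lists of integers (CNF). Output: True iff satisfiable.
--     """
--     if not clauses_input:
--         return True
--
--     clauses = {frozenset(clause) for clause in clauses_input}
--
--     if frozenset() in clauses:
--         return False
--
--     frontier = set(clauses)
--     while frontier:
--         new = set()
--         for f in frontier:
--             for c in clauses:
--                 if c == f:
--                     continue
--                 for lit in f:
--                     if -lit not in c:
--                         continue
--                     r = (f - {lit}) | (c - {-lit})
--                     if not r:
--                         return False  # empty clause derived: unsatisfiable
--                     if any(-x in r for x in r) or r in clauses: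
--                         continue  # tautology, or already known
--                     new.add(r)
--         if not new:
--             return True  # saturated without the empty clause: satisfiable
--         clauses |= new
--         frontier = new
--     return True
-- ===== Notes on version B (the rewrite author's own statement) =====
-- stated objective: alternative
-- what changed: Replaces A's per-round re-resolution of every pair of clauses by incremental (semi-naive) resolution: each round resolves only the newly derived clauses (the frontier) against the clause set, instead of re-scanning all pairs every round; intended as faster but a timing run did not confirm a measurable speed-up, so none is claimed.
import Mathlib
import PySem

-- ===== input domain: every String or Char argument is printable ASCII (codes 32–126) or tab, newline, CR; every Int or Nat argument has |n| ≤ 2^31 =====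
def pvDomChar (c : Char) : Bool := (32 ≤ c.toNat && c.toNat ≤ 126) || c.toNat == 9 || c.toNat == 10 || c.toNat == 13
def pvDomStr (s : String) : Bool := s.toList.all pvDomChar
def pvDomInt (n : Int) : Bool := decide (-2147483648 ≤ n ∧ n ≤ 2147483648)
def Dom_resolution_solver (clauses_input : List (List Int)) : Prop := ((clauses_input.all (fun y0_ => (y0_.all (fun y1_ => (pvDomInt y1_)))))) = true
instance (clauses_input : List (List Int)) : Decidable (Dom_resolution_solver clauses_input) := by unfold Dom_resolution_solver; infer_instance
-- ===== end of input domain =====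

-- B replaces A's per-round re-resolution of EVERY pair of clauses by incremental
-- (semi-naive) resolution: each round resolves only the newly derived clauses (the
-- frontier) against the clause set, instead of re-scanning all pairs every round
-- (intended as faster; a timing run did not confirm a measurable speed-up,
-- so none is claimed).
-- Python frozensets are modelled as canonical (sorted, duplicate-free) lists; the
-- returned Bool does not depend on Python's set iteration order (proved here by
-- working at the level of set membership).

-- ===== PORT A =====
-- clause canonicalisation: a Python frozenset of ints as a sorted duplicate-free list
def canonClause (c : List Int) : List Int :=
  PySem.List.sorted (PySem.Set.ofList c) (fun x => x) false

-- the resolvent (c1 - {lit}) | (c2 - {-lit}) as a canonical clause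
def resolventClause (c1 c2 : List Int) (lit : Int) : List Int :=
  canonClause (c1.erase lit ++ c2.erase (-lit))

-- 'for lit_r in temp_resolvent: if -lit_r in temp_resolvent: tautology'
def pyTaut (r : List Int) : Bool := r.any (fun l => decide ((-l) ∈ r))

-- resolve_two_clauses c1 c2: the set of non-tautological resolvents
def resolvePair (c1 c2 : List Int) : List (List Int) :=
  c1.foldl (fun acc lit =>
    if (-lit) ∈ c2 then
      if pyTaut (resolventClause c1 c2 lit) then acc
      else PySem.Set.add acc (resolventClause c1 c2 lit)
    else acc) []

-- 'for r in resolvents_from_pair: if not r: return False; if r not in clauses: newly.add(r)'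
def addResolvents (S : List (List Int)) : List (List Int) → List (List Int) → Option (List (List Int))
  | acc, [] => some acc
  | acc, r :: rs =>
      if r = [] then none
      else addResolvents S (if r ∈ S then acc else PySem.Set.add acc r) rs

-- inner loop: 'for j in range(i+1, len(clauses_list))'
def innerA (S : List (List Int)) (c1 : List Int) :
    List (List Int) → List (List Int) → Option (List (List Int))
  | acc, [] => some acc
  | acc, c2 :: rest =>
      match addResolvents S acc (resolvePair c1 c2) with
      | none => none
      | some acc' => innerA S c1 acc' rest

-- outer loop: 'for i in range(len(clauses_list))' (pairs i < j = head against tail)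
def roundA (S : List (List Int)) :
    List (List Int) → List (List Int) → Option (List (List Int))
  | acc, [] => some acc
  | acc, c1 :: rest =>
      match innerA S c1 acc rest with
      | none => none
      | some acc' => roundA S acc' rest

-- 'while True' saturation loop; the fuel only bounds the number of rounds (each
-- non-final round strictly grows the clause set, which lives inside the finite
-- family of canonical clauses over the input's literals, so the bound is never hit)
def loopA : Nat → List (List Int) → Bool
  | 0, _ => true
  | fuel + 1, S =>
      match roundA S [] S with
      | none => false
      | some newly => if newly.isEmpty then true else loopA fuel (PySem.Set.update S newly)

def resolution_solver (clauses_input : List (List Int)) : Bool :=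
  if clauses_input = [] then true
  else
    let clauses := PySem.Set.ofList (clauses_input.map canonClause)
    if ([] : List Int) ∈ clauses then false
    else loopA (2 ^ (clauses_input.map List.length).sum + 1) clauses

-- ===== PORT B =====
-- 'for lit in f: ...' of B's innermost loop
def procLits (S : List (List Int)) (f c : List Int) :
    List (List Int) → List Int → Option (List (List Int))
  | acc, [] => some acc
  | acc, lit :: ls =>
      if (-lit) ∈ c then
        if resolventClause f c lit = [] then none
        else
          if pyTaut (resolventClause f c lit) || decide (resolventClause f c lit ∈ S) then
            procLits S f c acc ls
          else procLits S f c (PySem.Set.add acc (resolventClause f c lit)) ls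
      else procLits S f c acc ls

-- 'for c in clauses: if c == f: continue'
def procClauses (S : List (List Int)) (f : List Int) :
    List (List Int) → List (List Int) → Option (List (List Int))
  | acc, [] => some acc
  | acc, c :: cs =>
      if c = f then procClauses S f acc cs
      else
        match procLits S f c acc f with
        | none => none
        | some acc' => procClauses S f acc' cs

-- 'for f in frontier'
def roundB (S : List (List Int)) :
    List (List Int) → List (List Int) → Option (List (List Int))
  | acc, [] => some acc
  | acc, f :: fs =>
      match procClauses S f acc S with
      | none => none
      | some acc' => roundB S acc' fs

-- 'while frontier' loop; same fuel bound as loopA (never hit, see above)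
def loopB : Nat → List (List Int) → List (List Int) → Bool
  | 0, _, _ => true
  | fuel + 1, S, Fr =>
      if Fr.isEmpty then true
      else
        match roundB S [] Fr with
        | none => false
        | some nw => if nw.isEmpty then true else loopB fuel (PySem.Set.update S nw) nw

def resolution_solver_alt (clauses_input : List (List Int)) : Bool :=
  if clauses_input = [] then true
  else
    let clauses := PySem.Set.ofList (clauses_input.map canonClause)
    if ([] : List Int) ∈ clauses then false
    else loopB (2 ^ (clauses_input.map List.length).sum + 1) clauses clauses

-- ===== PRECONDITION & SPEC =====
def Spec_resolution_solver (clauses_input : List (List Int)) (out : Bool) : Prop := out = resolution_solver_alt clauses_input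
instance (clauses_input : List (List Int)) (out : Bool) : Decidable (Spec_resolution_solver clauses_input out) := by unfold Spec_resolution_solver; infer_instance

-- ===== CLAIM (what is proved, stated in full; the proofs are below) =====
def Claim_equal_resolution_solver : Prop := ∀ (clauses_input : List (List Int)), Dom_resolution_solver clauses_input → Spec_resolution_solver clauses_input (resolution_solver clauses_input)

-- ===== LEMMAS AND PROOFS =====

-- x appears as a resolvent of some unordered pair of distinct clauses of l
def PairRes (l : List (List Int)) (x : List Int) : Prop :=
  ∃ c1 ∈ l, ∃ c2 ∈ l, c1 ≠ c2 ∧ x ∈ resolvePair c1 c2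

-- x appears as a resolvent of some frontier clause against some other clause of S
def FrontRes (S Fr : List (List Int)) (x : List Int) : Prop :=
  ∃ f ∈ Fr, ∃ c ∈ S, c ≠ f ∧ x ∈ resolvePair f c

lemma nodup_canonClause (c : List Int) : (canonClause c).Nodup := by
  unfold canonClause
  exact (PySem.List.sorted_perm _ _ _).nodup_iff.mpr (PySem.Set.nodup_ofList c)

lemma canonClause_congr (a b : List Int) (h : ∀ x, x ∈ a ↔ x ∈ b) :
    canonClause a = canonClause b := by
  apply PySem.List.sorted_eq_of_perm_of_pairwise_lt
  · exact ((PySem.List.sorted_perm (PySem.Set.ofList b) (fun x => x) false).trans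
      (((List.perm_ext_iff_of_nodup (PySem.Set.nodup_ofList b)
        (PySem.Set.nodup_ofList a)).mpr (by
          intro x; rw [PySem.Set.mem_ofList, PySem.Set.mem_ofList, h]))))
  · have hle := PySem.List.sorted_pairwise (PySem.Set.ofList b) (fun x => x)
    have hnd : (canonClause b).Nodup := nodup_canonClause b
    unfold canonClause at hnd ⊢
    exact (hle.and hnd).imp (fun hx => lt_of_le_of_ne hx.1 hx.2)

lemma resolventClause_comm (c1 c2 : List Int) (lit : Int) :
    resolventClause c1 c2 lit = resolventClause c2 c1 (-lit) := by
  unfold resolventClause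
  rw [neg_neg]
  exact canonClause_congr _ _ (by intro x; simp [List.mem_append]; tauto)

lemma mem_resolvePair (c1 c2 : List Int) (x : List Int) :
    x ∈ resolvePair c1 c2 ↔
      ∃ lit ∈ c1, (-lit) ∈ c2 ∧ x = resolventClause c1 c2 lit ∧ pyTaut x = false := by
  unfold resolvePair
  suffices h : ∀ (l : List Int) (acc : List (List Int)),
      (x ∈ l.foldl (fun acc lit =>
        if (-lit) ∈ c2 then
          if pyTaut (resolventClause c1 c2 lit) then acc
          else PySem.Set.add acc (resolventClause c1 c2 lit)
        else acc) acc ↔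
      x ∈ acc ∨ ∃ lit ∈ l, (-lit) ∈ c2 ∧ x = resolventClause c1 c2 lit ∧ pyTaut x = false) by
    rw [h c1 []]; simp
  intro l
  induction l with
  | nil => simp
  | cons lit ls ih =>
      intro acc
      simp only [List.foldl_cons]
      split_ifs with h1 h2
      · rw [ih]; constructor
        · rintro (hx | hx)
          · exact Or.inl hx
          · exact Or.inr (by obtain ⟨l', hl', rest⟩ := hx; exact ⟨l', List.mem_cons_of_mem _ hl', rest⟩)
        · rintro (hx | ⟨l', hl', hneg, hx, ht⟩)
          · exact Or.inl hx
          · rcases List.mem_cons.mp hl' with rfl | hl'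
            · exact absurd h2 (by rw [hx] at ht; rw [ht] at *; simp_all)
            · exact Or.inr ⟨l', hl', hneg, hx, ht⟩
      · rw [ih]; rw [PySem.Set.mem_add]; constructor
        · rintro ((hx | rfl) | hx)
          · exact Or.inl hx
          · exact Or.inr ⟨lit, List.mem_cons_self, h1, rfl, by simpa using h2⟩
          · obtain ⟨l', hl', rest⟩ := hx; exact Or.inr ⟨l', List.mem_cons_of_mem _ hl', rest⟩
        · rintro (hx | ⟨l', hl', hneg, hx, ht⟩)
          · exact Or.inl (Or.inl hx)
          · rcases List.mem_cons.mp hl' with rfl | hl'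
            · exact Or.inl (Or.inr hx)
            · exact Or.inr ⟨l', hl', hneg, hx, ht⟩
      · rw [ih]; constructor
        · rintro (hx | hx)
          · exact Or.inl hx
          · obtain ⟨l', hl', rest⟩ := hx; exact Or.inr ⟨l', List.mem_cons_of_mem _ hl', rest⟩
        · rintro (hx | ⟨l', hl', hneg, hx, ht⟩)
          · exact Or.inl hx
          · rcases List.mem_cons.mp hl' with rfl | hl'
            · exact absurd hneg h1
            · exact Or.inr ⟨l', hl', hneg, hx, ht⟩

lemma mem_resolvePair_comm (c1 c2 : List Int) (x : List Int) :
    x ∈ resolvePair c1 c2 ↔ x ∈ resolvePair c2 c1 := by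
  rw [mem_resolvePair, mem_resolvePair]
  constructor
  · rintro ⟨lit, h1, h2, rfl, ht⟩
    exact ⟨-lit, h2, by simpa using h1, resolventClause_comm c1 c2 lit, ht⟩
  · rintro ⟨lit, h1, h2, rfl, ht⟩
    exact ⟨-lit, h2, by simpa using h1, resolventClause_comm c2 c1 lit, ht⟩

-- ---- A side characterisations ----

lemma addResolvents_none_iff (S acc rs) :
    addResolvents S acc rs = none ↔ ([] : List Int) ∈ rs := by
  induction rs generalizing acc with
  | nil => simp [addResolvents]
  | cons r rs ih =>
      by_cases h : r = []
      · subst h; simp [addResolvents]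
      · simp [addResolvents, h, ih, List.mem_cons, Ne.symm h]

lemma addResolvents_some_mem (S acc rs acc') (h : addResolvents S acc rs = some acc') :
    ∀ x, x ∈ acc' ↔ x ∈ acc ∨ (x ∈ rs ∧ x ∉ S) := by
  induction rs generalizing acc with
  | nil => simp [addResolvents] at h; subst h; simp
  | cons r rs ih =>
      by_cases hr : r = []
      · subst hr; simp [addResolvents] at h
      · simp only [addResolvents, if_neg hr] at h
        intro x
        rw [ih _ h x]
        by_cases hrS : r ∈ S
        · simp only [if_pos hrS, List.mem_cons]
          constructor
          · rintro (hx | ⟨hx, hxS⟩)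
            · exact Or.inl hx
            · exact Or.inr ⟨Or.inr hx, hxS⟩
          · rintro (hx | ⟨rfl | hx, hxS⟩)
            · exact Or.inl hx
            · exact absurd hrS hxS
            · exact Or.inr ⟨hx, hxS⟩
        · simp only [if_neg hrS, PySem.Set.mem_add, List.mem_cons]
          constructor
          · rintro ((hx | rfl) | ⟨hx, hxS⟩)
            · exact Or.inl hx
            · exact Or.inr ⟨Or.inl rfl, hrS⟩
            · exact Or.inr ⟨Or.inr hx, hxS⟩
          · rintro (hx | ⟨rfl | hx, hxS⟩)
            · exact Or.inl (Or.inl hx)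
            · exact Or.inl (Or.inr rfl)
            · exact Or.inr ⟨hx, hxS⟩

lemma innerA_none_iff (S c1 acc l) :
    innerA S c1 acc l = none ↔ ∃ c2 ∈ l, ([] : List Int) ∈ resolvePair c1 c2 := by
  induction l generalizing acc with
  | nil => simp [innerA]
  | cons c2 rest ih =>
      simp only [innerA]
      cases h : addResolvents S acc (resolvePair c1 c2) with
      | none =>
          rw [addResolvents_none_iff] at h
          simp only [List.mem_cons]
          exact ⟨fun _ => ⟨c2, Or.inl rfl, h⟩, fun _ => by trivial⟩
      | some acc' =>
          have h0 : ([] : List Int) ∉ resolvePair c1 c2 := by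
            rw [← addResolvents_none_iff S acc]
            simp [h]
          rw [ih]
          simp only [List.mem_cons]
          constructor
          · rintro ⟨c, hc, hm⟩; exact ⟨c, Or.inr hc, hm⟩
          · rintro ⟨c, rfl | hc, hm⟩
            · exact absurd hm h0
            · exact ⟨c, hc, hm⟩

lemma innerA_some_mem (S c1 acc l acc') (h : innerA S c1 acc l = some acc') :
    ∀ x, x ∈ acc' ↔ x ∈ acc ∨ ∃ c2 ∈ l, x ∈ resolvePair c1 c2 ∧ x ∉ S := by
  induction l generalizing acc with
  | nil => simp [innerA] at h; subst h; simp
  | cons c2 rest ih =>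
      simp only [innerA] at h
      cases hadd : addResolvents S acc (resolvePair c1 c2) with
      | none => rw [hadd] at h; simp at h
      | some acc₁ =>
          rw [hadd] at h
          intro x
          rw [ih _ h x, addResolvents_some_mem _ _ _ _ hadd x]
          simp only [List.mem_cons]
          constructor
          · rintro ((hx | ⟨hx, hxS⟩) | ⟨c, hc, hm, hxS⟩)
            · exact Or.inl hx
            · exact Or.inr ⟨c2, Or.inl rfl, hx, hxS⟩
            · exact Or.inr ⟨c, Or.inr hc, hm, hxS⟩
          · rintro (hx | ⟨c, rfl | hc, hm, hxS⟩)
            · exact Or.inl (Or.inl hx)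
            · exact Or.inl (Or.inr ⟨hm, hxS⟩)
            · exact Or.inr ⟨c, hc, hm, hxS⟩

lemma pairRes_cons (c1 : List Int) (rest : List (List Int)) (hnd : (c1 :: rest).Nodup)
    (x : List Int) :
    PairRes (c1 :: rest) x ↔ (∃ c2 ∈ rest, x ∈ resolvePair c1 c2) ∨ PairRes rest x := by
  have hc1 : c1 ∉ rest := (List.nodup_cons.mp hnd).1
  constructor
  · rintro ⟨a, ha, b, hb, hab, hm⟩
    rcases List.mem_cons.mp ha with h1 | h1
    · rcases List.mem_cons.mp hb with h2 | h2
      · exact absurd (h1.trans h2.symm) hab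
      · exact Or.inl ⟨b, h2, h1 ▸ hm⟩
    · rcases List.mem_cons.mp hb with h2 | h2
      · exact Or.inl ⟨a, h1, (mem_resolvePair_comm a c1 x).mp (h2 ▸ hm)⟩
      · exact Or.inr ⟨a, h1, b, h2, hab, hm⟩
  · rintro (⟨c2, hc2, hm⟩ | ⟨a, ha, b, hb, hab, hm⟩)
    · exact ⟨c1, List.mem_cons_self, c2, List.mem_cons_of_mem _ hc2,
        fun h => hc1 (h ▸ hc2), hm⟩
    · exact ⟨a, List.mem_cons_of_mem _ ha, b, List.mem_cons_of_mem _ hb, hab, hm⟩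

lemma roundA_none_iff (S acc l) (hnd : l.Nodup) :
    roundA S acc l = none ↔ PairRes l ([] : List Int) := by
  induction l generalizing acc with
  | nil =>
      simp only [roundA]
      constructor
      · intro h; simp at h
      · rintro ⟨a, ha, _⟩; simp at ha
  | cons c1 rest ih =>
      simp only [roundA]
      rw [pairRes_cons c1 rest hnd]
      cases h : innerA S c1 acc rest with
      | none =>
          rw [innerA_none_iff] at h
          exact ⟨fun _ => Or.inl h, fun _ => by trivial⟩
      | some acc' =>
          have h0 : ¬ ∃ c2 ∈ rest, ([] : List Int) ∈ resolvePair c1 c2 := by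
            rw [← innerA_none_iff S c1 acc]; simp [h]
          rw [ih _ (List.nodup_cons.mp hnd).2]
          exact ⟨fun hp => Or.inr hp, fun hp => hp.resolve_left h0⟩

lemma roundA_some_mem (S acc l acc') (hnd : l.Nodup) (h : roundA S acc l = some acc') :
    ∀ x, x ∈ acc' ↔ x ∈ acc ∨ (PairRes l x ∧ x ∉ S) := by
  induction l generalizing acc with
  | nil =>
      simp only [roundA] at h
      injection h with h; subst h
      intro x
      constructor
      · exact fun hx => Or.inl hx
      · rintro (hx | ⟨⟨a, ha, _⟩, _⟩)
        · exact hx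
        · simp at ha
  | cons c1 rest ih =>
      simp only [roundA] at h
      cases hin : innerA S c1 acc rest with
      | none => rw [hin] at h; simp at h
      | some acc₁ =>
          rw [hin] at h
          intro x
          rw [ih _ (List.nodup_cons.mp hnd).2 h x, innerA_some_mem _ _ _ _ _ hin x,
            pairRes_cons c1 rest hnd]
          constructor
          · rintro ((hx | ⟨c2, hc2, hm, hxS⟩) | ⟨hp, hxS⟩)
            · exact Or.inl hx
            · exact Or.inr ⟨Or.inl ⟨c2, hc2, hm⟩, hxS⟩
            · exact Or.inr ⟨Or.inr hp, hxS⟩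
          · rintro (hx | ⟨⟨c2, hc2, hm⟩ | hp, hxS⟩)
            · exact Or.inl (Or.inl hx)
            · exact Or.inl (Or.inr ⟨c2, hc2, hm, hxS⟩)
            · exact Or.inr ⟨hp, hxS⟩

-- ---- B side characterisations ----

lemma procLits_none_iff (S f c acc ls) :
    procLits S f c acc ls = none ↔
      ∃ lit ∈ ls, (-lit) ∈ c ∧ resolventClause f c lit = [] := by
  induction ls generalizing acc with
  | nil => simp [procLits]
  | cons lit ls ih =>
      simp only [procLits]
      split_ifs with h1 h2 h3
      · simp only [List.mem_cons]
        constructor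
        · intro _; exact ⟨lit, Or.inl rfl, h1, h2⟩
        · intro _; trivial
      · rw [ih]
        simp only [List.mem_cons]
        constructor
        · rintro ⟨l', hl', hm⟩; exact ⟨l', Or.inr hl', hm⟩
        · rintro ⟨l', rfl | hl', hneg, hres⟩
          · exact absurd hres h2
          · exact ⟨l', hl', hneg, hres⟩
      · rw [ih]
        simp only [List.mem_cons]
        constructor
        · rintro ⟨l', hl', hm⟩; exact ⟨l', Or.inr hl', hm⟩
        · rintro ⟨l', rfl | hl', hneg, hres⟩
          · exact absurd hres h2
          · exact ⟨l', hl', hneg, hres⟩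
      · rw [ih]
        simp only [List.mem_cons]
        constructor
        · rintro ⟨l', hl', hm⟩; exact ⟨l', Or.inr hl', hm⟩
        · rintro ⟨l', rfl | hl', hneg, hres⟩
          · exact absurd hneg h1
          · exact ⟨l', hl', hneg, hres⟩

lemma procLits_some_mem (S f c acc ls acc') (h : procLits S f c acc ls = some acc') :
    ∀ x, x ∈ acc' ↔ x ∈ acc ∨
      ∃ lit ∈ ls, (-lit) ∈ c ∧ x = resolventClause f c lit ∧ pyTaut x = false ∧ x ∉ S := by
  induction ls generalizing acc with
  | nil => simp [procLits] at h; subst h; simp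
  | cons lit ls ih =>
      simp only [procLits] at h
      split_ifs at h with h1 h2 h3
      · intro x
        rw [ih _ h x]
        simp only [List.mem_cons]
        rw [Bool.or_eq_true, decide_eq_true_iff] at h3
        constructor
        · rintro (hx | ⟨l', hl', rest⟩)
          · exact Or.inl hx
          · exact Or.inr ⟨l', Or.inr hl', rest⟩
        · rintro (hx | ⟨l', rfl | hl', hneg, rfl, ht, hS⟩)
          · exact Or.inl hx
          · rcases h3 with h3 | h3
            · exact absurd h3 (by simp [ht])
            · exact absurd h3 hS
          · exact Or.inr ⟨l', hl', hneg, rfl, ht, hS⟩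
      · intro x
        rw [ih _ h x, PySem.Set.mem_add]
        simp only [List.mem_cons]
        rw [Bool.or_eq_true, decide_eq_true_iff] at h3
        push Not at h3
        constructor
        · rintro ((hx | rfl) | ⟨l', hl', rest⟩)
          · exact Or.inl hx
          · exact Or.inr ⟨lit, Or.inl rfl, h1, rfl, by simpa using h3.1, h3.2⟩
          · exact Or.inr ⟨l', Or.inr hl', rest⟩
        · rintro (hx | ⟨l', rfl | hl', hneg, rfl, ht, hS⟩)
          · exact Or.inl (Or.inl hx)
          · exact Or.inl (Or.inr rfl)
          · exact Or.inr ⟨l', hl', hneg, rfl, ht, hS⟩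
      · intro x
        rw [ih _ h x]
        simp only [List.mem_cons]
        constructor
        · rintro (hx | ⟨l', hl', rest⟩)
          · exact Or.inl hx
          · exact Or.inr ⟨l', Or.inr hl', rest⟩
        · rintro (hx | ⟨l', rfl | hl', hneg, rest⟩)
          · exact Or.inl hx
          · exact absurd hneg h1
          · exact Or.inr ⟨l', hl', hneg, rest⟩

-- procLits over the whole clause f is resolvePair f c restricted to new clauses
lemma procLits_none_iff' (S f c acc) :
    procLits S f c acc f = none ↔ ([] : List Int) ∈ resolvePair f c := by
  rw [procLits_none_iff, mem_resolvePair]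
  constructor
  · rintro ⟨lit, hl, hneg, hres⟩
    exact ⟨lit, hl, hneg, hres.symm, rfl⟩
  · rintro ⟨lit, hl, hneg, hres, _⟩
    exact ⟨lit, hl, hneg, hres.symm⟩

lemma procLits_some_mem' (S f c acc acc') (h : procLits S f c acc f = some acc') :
    ∀ x, x ∈ acc' ↔ x ∈ acc ∨ (x ∈ resolvePair f c ∧ x ∉ S) := by
  intro x
  rw [procLits_some_mem _ _ _ _ _ _ h x, mem_resolvePair]
  constructor
  · rintro (hx | ⟨lit, hl, hneg, rfl, ht, hS⟩)
    · exact Or.inl hx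
    · exact Or.inr ⟨⟨lit, hl, hneg, rfl, ht⟩, hS⟩
  · rintro (hx | ⟨⟨lit, hl, hneg, rfl, ht⟩, hS⟩)
    · exact Or.inl hx
    · exact Or.inr ⟨lit, hl, hneg, rfl, ht, hS⟩

lemma procClauses_none_iff (S f acc cs) :
    procClauses S f acc cs = none ↔
      ∃ c ∈ cs, c ≠ f ∧ ([] : List Int) ∈ resolvePair f c := by
  induction cs generalizing acc with
  | nil => simp [procClauses]
  | cons c cs ih =>
      simp only [procClauses]
      split_ifs with hcf
      · subst hcf
        rw [ih]
        simp only [List.mem_cons]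
        constructor
        · rintro ⟨c', hc', hm⟩; exact ⟨c', Or.inr hc', hm⟩
        · rintro ⟨c', rfl | hc', hne, hm⟩
          · exact absurd rfl hne
          · exact ⟨c', hc', hne, hm⟩
      · cases hp : procLits S f c acc f with
        | none =>
            rw [procLits_none_iff'] at hp
            simp only [List.mem_cons]
            exact ⟨fun _ => ⟨c, Or.inl rfl, hcf, hp⟩, fun _ => by trivial⟩
        | some acc₁ =>
            have h0 : ([] : List Int) ∉ resolvePair f c := by
              rw [← procLits_none_iff' S f c acc]; simp [hp]
            rw [ih]
            simp only [List.mem_cons]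
            constructor
            · rintro ⟨c', hc', hm⟩; exact ⟨c', Or.inr hc', hm⟩
            · rintro ⟨c', rfl | hc', hne, hm⟩
              · exact absurd hm h0
              · exact ⟨c', hc', hne, hm⟩

lemma procClauses_some_mem (S f acc cs acc') (h : procClauses S f acc cs = some acc') :
    ∀ x, x ∈ acc' ↔ x ∈ acc ∨ ∃ c ∈ cs, c ≠ f ∧ x ∈ resolvePair f c ∧ x ∉ S := by
  induction cs generalizing acc with
  | nil =>
      simp [procClauses] at h; subst h; simp
  | cons c cs ih =>
      simp only [procClauses] at h
      split_ifs at h with hcf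
      · subst hcf
        intro x
        rw [ih _ h x]
        simp only [List.mem_cons]
        constructor
        · rintro (hx | ⟨c', hc', rest⟩)
          · exact Or.inl hx
          · exact Or.inr ⟨c', Or.inr hc', rest⟩
        · rintro (hx | ⟨c', rfl | hc', hne, rest⟩)
          · exact Or.inl hx
          · exact absurd rfl hne
          · exact Or.inr ⟨c', hc', hne, rest⟩
      · cases hp : procLits S f c acc f with
        | none => rw [hp] at h; simp at h
        | some acc₁ =>
            rw [hp] at h
            intro x
            rw [ih _ h x, procLits_some_mem' _ _ _ _ _ hp x]
            simp only [List.mem_cons]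
            constructor
            · rintro ((hx | ⟨hm, hS⟩) | ⟨c', hc', rest⟩)
              · exact Or.inl hx
              · exact Or.inr ⟨c, Or.inl rfl, hcf, hm, hS⟩
              · exact Or.inr ⟨c', Or.inr hc', rest⟩
            · rintro (hx | ⟨c', rfl | hc', hne, hm, hS⟩)
              · exact Or.inl (Or.inl hx)
              · exact Or.inl (Or.inr ⟨hm, hS⟩)
              · exact Or.inr ⟨c', hc', hne, hm, hS⟩

lemma roundB_none_iff (S acc fs) :
    roundB S acc fs = none ↔ FrontRes S fs ([] : List Int) := by
  induction fs generalizing acc with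
  | nil =>
      simp only [roundB]
      constructor
      · intro h; simp at h
      · rintro ⟨f, hf, _⟩; simp at hf
  | cons f fs ih =>
      simp only [roundB]
      cases hp : procClauses S f acc S with
      | none =>
          rw [procClauses_none_iff] at hp
          constructor
          · intro _
            obtain ⟨c, hc, hne, hm⟩ := hp
            exact ⟨f, List.mem_cons_self, c, hc, hne, hm⟩
          · intro _; trivial
      | some acc₁ =>
          have h0 : ¬ ∃ c ∈ S, c ≠ f ∧ ([] : List Int) ∈ resolvePair f c := by
            rw [← procClauses_none_iff S f acc]; simp [hp]
          rw [ih]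
          constructor
          · rintro ⟨f', hf', rest⟩; exact ⟨f', List.mem_cons_of_mem _ hf', rest⟩
          · rintro ⟨f', hf', c, hc, hne, hm⟩
            rcases List.mem_cons.mp hf' with rfl | hf'
            · exact absurd ⟨c, hc, hne, hm⟩ h0
            · exact ⟨f', hf', c, hc, hne, hm⟩

lemma roundB_some_mem (S acc fs acc') (h : roundB S acc fs = some acc') :
    ∀ x, x ∈ acc' ↔ x ∈ acc ∨ (FrontRes S fs x ∧ x ∉ S) := by
  induction fs generalizing acc with
  | nil =>
      simp only [roundB] at h
      injection h with h; subst h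
      intro x
      constructor
      · exact fun hx => Or.inl hx
      · rintro (hx | ⟨⟨f, hf, _⟩, _⟩)
        · exact hx
        · simp at hf
  | cons f fs ih =>
      simp only [roundB] at h
      cases hp : procClauses S f acc S with
      | none => rw [hp] at h; simp at h
      | some acc₁ =>
          rw [hp] at h
          intro x
          rw [ih _ h x, procClauses_some_mem _ _ _ _ _ hp x]
          constructor
          · rintro ((hx | ⟨c, hc, hne, hm, hS⟩) | ⟨⟨f', hf', rest⟩, hS⟩)
            · exact Or.inl hx
            · exact Or.inr ⟨⟨f, List.mem_cons_self, c, hc, hne, hm⟩, hS⟩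
            · exact Or.inr ⟨⟨f', List.mem_cons_of_mem _ hf', rest⟩, hS⟩
          · rintro (hx | ⟨⟨f', hf', c, hc, hne, hm⟩, hS⟩)
            · exact Or.inl (Or.inl hx)
            · rcases List.mem_cons.mp hf' with rfl | hf'
              · exact Or.inl (Or.inr ⟨c, hc, hne, hm, hS⟩)
              · exact Or.inr ⟨⟨f', hf', c, hc, hne, hm⟩, hS⟩

-- ---- the bridge: under the frontier invariant, full pairwise resolution and
-- frontier-only resolution produce the same NEW clauses ----

lemma bridge (S SB Fr : List (List Int))
    (hmem : ∀ r, r ∈ S ↔ r ∈ SB)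
    (hFr : ∀ f ∈ Fr, f ∈ SB)
    (hclosed : ∀ c1 ∈ S, ∀ c2 ∈ S, c1 ≠ c2 → c1 ∉ Fr → c2 ∉ Fr →
      ∀ r ∈ resolvePair c1 c2, r ∈ S)
    (x : List Int) (hx : x ∉ S) :
    PairRes S x ↔ FrontRes SB Fr x := by
  constructor
  · rintro ⟨c1, hc1, c2, hc2, hne, hm⟩
    by_cases h1 : c1 ∈ Fr
    · exact ⟨c1, h1, c2, (hmem c2).mp hc2, hne.symm, hm⟩
    · by_cases h2 : c2 ∈ Fr
      · exact ⟨c2, h2, c1, (hmem c1).mp hc1, hne, (mem_resolvePair_comm c1 c2 x).mp hm⟩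
      · exact absurd (hclosed c1 hc1 c2 hc2 hne h1 h2 x hm) hx
  · rintro ⟨f, hf, c, hc, hne, hm⟩
    exact ⟨f, (hmem f).mpr (hFr f hf), c, (hmem c).mpr hc, hne.symm, hm⟩

-- ---- main loop equivalence ----

lemma loop_eq : ∀ (fuel : Nat) (S SB Fr : List (List Int)),
    S.Nodup → SB.Nodup →
    (∀ r, r ∈ S ↔ r ∈ SB) →
    (∀ f ∈ Fr, f ∈ SB) →
    (∀ c1 ∈ S, ∀ c2 ∈ S, c1 ≠ c2 → c1 ∉ Fr → c2 ∉ Fr →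
      ∀ r ∈ resolvePair c1 c2, r ∈ S) →
    ([] : List Int) ∉ S →
    loopA fuel S = loopB fuel SB Fr := by
  intro fuel
  induction fuel with
  | zero => intros; rfl
  | succ fuel ih =>
      intro S SB Fr hS hSB hmem hFr hclosed hne
      have hbr := bridge S SB Fr hmem hFr hclosed
      simp only [loopA, loopB]
      by_cases hFrE : Fr.isEmpty
      · rw [if_pos hFrE]
        have hFrNil : Fr = [] := List.isEmpty_iff.mp hFrE
        subst hFrNil
        have hnone : roundA S [] S ≠ none := by
          rw [Ne, roundA_none_iff S [] S hS]
          intro hp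
          obtain ⟨f, hf, _⟩ := (hbr [] hne).mp hp
          simp at hf
        cases hA : roundA S [] S with
        | none => exact absurd hA hnone
        | some newly =>
            have : newly = [] := by
              rw [List.eq_nil_iff_forall_not_mem]
              intro x hx
              rcases (roundA_some_mem S [] S newly hS hA x).mp hx with hx' | ⟨hp, hxS⟩
              · simp at hx'
              · obtain ⟨f, hf, _⟩ := (hbr x hxS).mp hp
                simp at hf
            subst this
            rfl
      · rw [if_neg hFrE]
        cases hB : roundB SB [] Fr with
        | none =>
            have : roundA S [] S = none := by
              rw [roundA_none_iff S [] S hS]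
              exact (hbr [] hne).mpr ((roundB_none_iff SB [] Fr).mp hB)
            rw [this]
        | some nw =>
            have hAnone : roundA S [] S ≠ none := by
              rw [Ne, roundA_none_iff S [] S hS]
              intro hp
              have : roundB SB [] Fr = none :=
                (roundB_none_iff SB [] Fr).mpr ((hbr [] hne).mp hp)
              rw [hB] at this
              simp at this
            cases hA : roundA S [] S with
            | none => exact absurd hA hAnone
            | some newly =>
                have hiff : ∀ x, x ∈ newly ↔ x ∈ nw := by
                  intro x
                  rw [roundA_some_mem S [] S newly hS hA x,
                    roundB_some_mem SB [] Fr nw hB x]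
                  simp only [List.not_mem_nil, false_or]
                  constructor
                  · rintro ⟨hp, hxS⟩
                    exact ⟨(hbr x hxS).mp hp, fun hxSB => hxS ((hmem x).mpr hxSB)⟩
                  · rintro ⟨hp, hxSB⟩
                    have hxS : x ∉ S := fun hxS => hxSB ((hmem x).mp hxS)
                    exact ⟨(hbr x hxS).mpr hp, hxS⟩
                have hEmpIff : newly.isEmpty = nw.isEmpty := by
                  cases hn : newly with
                  | nil =>
                      cases hw : nw with
                      | nil => rfl
                      | cons a t =>
                          exfalso
                          have := (hiff a).mpr (hw ▸ List.mem_cons_self)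
                          rw [hn] at this
                          simp at this
                  | cons a t =>
                      cases hw : nw with
                      | nil =>
                          exfalso
                          have := (hiff a).mp (hn ▸ List.mem_cons_self)
                          rw [hw] at this
                          simp at this
                      | cons b u => rfl
                dsimp only
                rw [hEmpIff]
                by_cases hE : nw.isEmpty
                · rw [if_pos hE, if_pos hE]
                · rw [if_neg hE, if_neg hE]
                  -- establish the invariant for the next round and recurse
                  have hnewlyA : ∀ x, x ∈ newly ↔ (PairRes S x ∧ x ∉ S) := by
                    intro x
                    rw [roundA_some_mem S [] S newly hS hA x]
                    simp
                  have hnoEmptyPair : ¬ PairRes S ([] : List Int) := by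
                    intro hp
                    have : roundA S [] S = none := (roundA_none_iff S [] S hS).mpr hp
                    rw [hA] at this
                    simp at this
                  apply ih
                  · exact PySem.Set.nodup_update S newly hS
                  · exact PySem.Set.nodup_update SB nw hSB
                  · intro r
                    rw [PySem.Set.mem_update, PySem.Set.mem_update, hmem r, hiff r]
                  · intro f hf
                    rw [PySem.Set.mem_update]
                    exact Or.inr hf
                  · intro c1 hc1 c2 hc2 hne12 hc1F hc2F r hr
                    rw [PySem.Set.mem_update] at hc1 hc2 ⊢
                    have hc1S : c1 ∈ S := by
                      rcases hc1 with h | h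
                      · exact h
                      · exact absurd ((hiff c1).mp h) hc1F
                    have hc2S : c2 ∈ S := by
                      rcases hc2 with h | h
                      · exact h
                      · exact absurd ((hiff c2).mp h) hc2F
                    by_cases hrS : r ∈ S
                    · exact Or.inl hrS
                    · exact Or.inr ((hnewlyA r).mpr
                        ⟨⟨c1, hc1S, c2, hc2S, hne12, hr⟩, hrS⟩)
                  · rw [PySem.Set.mem_update]
                    rintro (h | h)
                    · exact hne h
                    · exact hnoEmptyPair ((hnewlyA []).mp h).1

-- ===== VERDICT (by name: the statement is the Claim_ definition above) =====
theorem resolution_solver_spec : Claim_equal_resolution_solver := by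
  intro clauses_input _
  unfold Spec_resolution_solver resolution_solver resolution_solver_alt
  by_cases h0 : clauses_input = []
  · rw [if_pos h0, if_pos h0]
  · rw [if_neg h0, if_neg h0]
    set S0 := PySem.Set.ofList (clauses_input.map canonClause) with hS0
    by_cases hE : ([] : List Int) ∈ S0
    · rw [if_pos hE, if_pos hE]
    · rw [if_neg hE, if_neg hE]
      apply loop_eq
      · exact PySem.Set.nodup_ofList _
      · exact PySem.Set.nodup_ofList _
      · intro r; rfl
      · intro f hf; exact hf
      · intro c1 hc1 c2 hc2 _ hc1F _ r _
        exact absurd hc1 hc1F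
      · exact hE
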